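-- pv_equiv track=rewrite | github.com/devng/code-puzzles | src/devng/codechef/nicequad/nicequad.py | is_in_all_quadrants
-- ===== SOURCE A (Python) =====
-- def get_quadrant(p):
--     """
--     Gets the quadrant for a point. Point is represented as a tuple of 2, i.e., p = (x, y)
--     Returns 1 (where the signs of the two coordinates are (+,+)), 2 (−,+), 3 (−,−), and 4 (+,−).
--     Note 0 is considered to have a plus sign
--     """
--     if p[0] >= 0 and p[1] >= 0:
--         return 1
--     elif p[0] < 0 and p[1] >= 0:
--         return 2
--     elif p[0] < 0 and p[1] < 0:
--         return 3
--     else: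
--         return 4
--
-- def is_in_all_quadrants(q):
--     """
--     Checks if the quadrange has a point in all 4 quadrants.
--     Quadrange is represented as a tuple of 4 points, i.e., q = ((x,y), (x,y), (x,y), (x,y))
--     """
--     quadrants = [False, False, False, False]
--
--     for p in q:
--         quadrants[get_quadrant(p) - 1] = True
--
--     for b in quadrants:
--         if not b:
--             return False
--
--     return True
-- ===== SOURCE B (Python) =====
-- def is_in_all_quadrants(q):
--     return (any(x >= 0 and y >= 0 for (x, y) in q)
--             and any(x < 0 and y >= 0 for (x, y) in q)
--             and any(x < 0 and y < 0 for (x, y) in q)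
--             and any(x >= 0 and y < 0 for (x, y) in q))
-- ===== Notes on version B (the rewrite author's own statement) =====
-- stated objective: simpler
-- what changed: Replaced the quadrant-classifying helper plus a mutated boolean presence array and a second verification loop by a single conjunction of four independent any() scans, one per sign combination.
import Mathlib
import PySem

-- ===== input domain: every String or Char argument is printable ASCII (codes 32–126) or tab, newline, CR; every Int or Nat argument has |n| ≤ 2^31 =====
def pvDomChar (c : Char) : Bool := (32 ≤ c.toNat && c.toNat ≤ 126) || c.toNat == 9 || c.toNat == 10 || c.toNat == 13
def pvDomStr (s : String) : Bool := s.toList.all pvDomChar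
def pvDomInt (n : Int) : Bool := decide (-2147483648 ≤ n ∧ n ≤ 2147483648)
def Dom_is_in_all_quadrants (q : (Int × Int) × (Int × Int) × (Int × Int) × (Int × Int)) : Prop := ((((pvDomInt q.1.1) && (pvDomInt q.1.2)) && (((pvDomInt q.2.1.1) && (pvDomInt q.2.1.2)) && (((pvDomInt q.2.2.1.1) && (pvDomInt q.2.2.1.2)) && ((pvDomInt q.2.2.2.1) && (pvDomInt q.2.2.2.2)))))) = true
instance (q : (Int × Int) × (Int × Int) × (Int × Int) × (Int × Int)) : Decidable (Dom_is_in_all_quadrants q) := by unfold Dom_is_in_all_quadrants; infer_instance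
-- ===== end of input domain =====

-- B replaces A's quadrant helper + mutated presence array + verify loop by four independent any-scans (simpler decomposition).

-- ===== PORT A =====
def get_quadrant (p : Int × Int) : Int :=
  if p.1 ≥ 0 ∧ p.2 ≥ 0 then 1
  else if p.1 < 0 ∧ p.2 ≥ 0 then 2
  else if p.1 < 0 ∧ p.2 < 0 then 3
  else 4

-- the first loop: quadrants[get_quadrant(p) - 1] = True, folded over the four points
def pvMarkLoop (quadrants : List Bool) (ps : List (Int × Int)) : List Bool :=
  ps.foldl (fun qs p => qs.set (get_quadrant p - 1).toNat true) quadrants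

-- the second loop: return False at the first False, else True
def pvCheckLoop : List Bool → Bool
  | [] => true
  | b :: rest => if !b then false else pvCheckLoop rest

def is_in_all_quadrants (q : (Int × Int) × (Int × Int) × (Int × Int) × (Int × Int)) : Bool :=
  pvCheckLoop (pvMarkLoop [false, false, false, false] [q.1, q.2.1, q.2.2.1, q.2.2.2])

-- ===== PORT B =====
def is_in_all_quadrants_alt (q : (Int × Int) × (Int × Int) × (Int × Int) × (Int × Int)) : Bool :=
  let pts := [q.1, q.2.1, q.2.2.1, q.2.2.2]
  (pts.any fun p => decide (p.1 ≥ 0 ∧ p.2 ≥ 0)) &&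
  (pts.any fun p => decide (p.1 < 0 ∧ p.2 ≥ 0)) &&
  (pts.any fun p => decide (p.1 < 0 ∧ p.2 < 0)) &&
  (pts.any fun p => decide (p.1 ≥ 0 ∧ p.2 < 0))

-- ===== PRECONDITION & SPEC =====
def Spec_is_in_all_quadrants (q : (Int × Int) × (Int × Int) × (Int × Int) × (Int × Int)) (out : Bool) : Prop := out = is_in_all_quadrants_alt q
instance (q : (Int × Int) × (Int × Int) × (Int × Int) × (Int × Int)) (out : Bool) : Decidable (Spec_is_in_all_quadrants q out) := by unfold Spec_is_in_all_quadrants; infer_instance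

-- ===== CLAIM (what is proved, stated in full; the proofs are below) =====
def Claim_equal_is_in_all_quadrants : Prop := ∀ (q : (Int × Int) × (Int × Int) × (Int × Int) × (Int × Int)), Dom_is_in_all_quadrants q → Spec_is_in_all_quadrants q (is_in_all_quadrants q)

-- ===== LEMMAS AND PROOFS =====

-- effect of one marking step on the presence array
theorem pv_step (a b c d : Bool) (p : Int × Int) :
    List.set [a, b, c, d] (get_quadrant p - 1).toNat true =
      [a || decide (p.1 ≥ 0 ∧ p.2 ≥ 0), b || decide (p.1 < 0 ∧ p.2 ≥ 0),
       c || decide (p.1 < 0 ∧ p.2 < 0), d || decide (p.1 ≥ 0 ∧ p.2 < 0)] := by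
  unfold get_quadrant
  rcases lt_or_ge p.1 0 with h | h <;> rcases lt_or_ge p.2 0 with k | k <;>
    simp [h, k, not_lt.mpr, not_le.mpr]

-- invariant of the marking loop
theorem pv_mark (ps : List (Int × Int)) : ∀ (a b c d : Bool),
    pvMarkLoop [a, b, c, d] ps =
      [a || ps.any (fun p => decide (p.1 ≥ 0 ∧ p.2 ≥ 0)),
       b || ps.any (fun p => decide (p.1 < 0 ∧ p.2 ≥ 0)),
       c || ps.any (fun p => decide (p.1 < 0 ∧ p.2 < 0)),
       d || ps.any (fun p => decide (p.1 ≥ 0 ∧ p.2 < 0))] := by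
  induction ps with
  | nil => intro a b c d; simp [pvMarkLoop]
  | cons p ps ih =>
      intro a b c d
      show pvMarkLoop (List.set [a, b, c, d] (get_quadrant p - 1).toNat true) ps = _
      rw [pv_step, ih]
      simp [Bool.or_assoc]

-- ===== VERDICT (by name: the statement is the Claim_ definition above) =====
theorem is_in_all_quadrants_spec : Claim_equal_is_in_all_quadrants := by
  intro q _
  unfold Spec_is_in_all_quadrants is_in_all_quadrants is_in_all_quadrants_alt
  rw [pv_mark]
  simp [pvCheckLoop, Bool.and_assoc, ← decide_not, not_lt, not_le]
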